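-- pv_equiv track=rewrite | github.com/dallyy/code-by-python | 数学相关模板/数学.py | fps_div_naive
-- ===== SOURCE A (Python) =====
-- def fps_div_naive(a, b, deg=-1):
--     """
--     朴素形式幂级数除法
--     计算多项式a除以b的商，精度为deg项
--     """
--     if deg == -1:
--         deg = max(len(a), len(b))
--     if not b or b[0] % mod == 0:
--         raise ZeroDivisionError("b[0] == 0 mod mod")
--
--     inv_b0 = pow(b[0] % mod, mod - 2, mod)
--     q = [0] * deg
--
--     for n in range(deg):
--         s = a[n] % mod if n < len(a) else 0
--         upper = min(n, len(b) - 1)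
--         for i in range(1, upper + 1):
--             s = (s - b[i] * q[n - i]) % mod
--         q[n] = s * inv_b0 % mod
--
--     return q
--
-- mod = 998244353
-- ===== SOURCE B (Python) =====
-- mod = 998244353
--
-- def fps_div_naive(a, b, deg=-1):
--     """Long-division (scatter) form: compute each quotient coefficient and
--     immediately propagate its contribution forward into a residual array,
--     instead of gathering a convolution sum for every coefficient."""
--     if deg == -1:
--         deg = max(len(a), len(b))
--     if not b or b[0] % mod == 0:
--         raise ZeroDivisionError("b[0] == 0 mod mod")
--     inv_b0 = pow(b[0] % mod, mod - 2, mod)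
--     r = [a[n] % mod if n < len(a) else 0 for n in range(deg)]
--     q = []
--     for n in range(deg):
--         qn = r[n] * inv_b0 % mod
--         q.append(qn)
--         hi = min(deg - 1 - n, len(b) - 1)
--         for i in range(1, hi + 1):
--             r[n + i] = (r[n + i] - b[i] * qn) % mod
--     return q
-- ===== Notes on version B (the rewrite author's own statement) =====
-- stated objective: alternative
-- what changed: A gathers a fresh convolution sum over all earlier quotient coefficients for each q[n]; B performs long division: it keeps a residual array initialized from a and, as soon as each quotient coefficient is produced, scatters its contribution b[i]*q[n] forward into r[n+i], so q[n] is read off directly as r[n]*inv_b0 % mod.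
import Mathlib
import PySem

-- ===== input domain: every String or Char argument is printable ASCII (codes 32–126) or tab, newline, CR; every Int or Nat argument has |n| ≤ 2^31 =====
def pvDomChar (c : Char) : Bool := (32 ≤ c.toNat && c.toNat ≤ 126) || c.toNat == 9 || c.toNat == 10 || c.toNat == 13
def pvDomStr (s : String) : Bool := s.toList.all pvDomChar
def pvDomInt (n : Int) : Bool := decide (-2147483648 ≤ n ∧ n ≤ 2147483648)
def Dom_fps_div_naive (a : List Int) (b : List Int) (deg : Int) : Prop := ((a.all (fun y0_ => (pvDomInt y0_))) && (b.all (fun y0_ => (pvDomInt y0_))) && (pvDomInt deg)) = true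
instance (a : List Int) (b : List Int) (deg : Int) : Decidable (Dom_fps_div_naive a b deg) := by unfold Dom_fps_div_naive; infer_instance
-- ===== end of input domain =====

-- B replaces A's gather loop (each q[n] recomputes a convolution sum over earlier
-- coefficients) by long-division form: each new quotient coefficient is scattered
-- forward into a residual array.  Same O(deg^2) cost, different algorithm shape
-- ('alternative'); equivalence of the return values is proved below.

def pvMod : Int := 998244353

-- Python's builtin pow(base, e, m) (m > 0): modular exponentiation by squaring.
def pvPow (bb : Int) (e : Nat) (m : Int) : Int :=
  if h : e = 0 then 1 % m
  else
    let half := pvPow ((bb * bb) % m) (e / 2) m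
    if e % 2 = 1 then half * bb % m else half
termination_by e
decreasing_by exact Nat.div_lt_self (Nat.pos_of_ne_zero h) (by norm_num)

-- ===== PORT A =====
-- one iteration of A's outer loop: gather the convolution sum, then q[n] = s * inv % mod
def pvAStep (a : List Int) (b : List Int) (iv : Int) (q : List Int) (n : Nat) : List Int :=
  let s0 : Int := if n < a.length then a.getD n 0 % pvMod else 0
  let upper := min n (b.length - 1)
  let s := (List.range' 1 upper).foldl (fun s i => (s - b.getD i 0 * q.getD (n - i) 0) % pvMod) s0
  q.set n (s * iv % pvMod)

def fps_div_naive (a : List Int) (b : List Int) (deg : Int) : List Int :=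
  let deg1 : Int := if deg = -1 then max (a.length : Int) (b.length : Int) else deg
  let inv_b0 := pvPow (b.getD 0 0 % pvMod) (pvMod - 2).toNat pvMod
  let dd := deg1.toNat   -- range(deg) and [0]*deg are empty for deg ≤ 0, as in Python
  (List.range dd).foldl (pvAStep a b inv_b0) (List.replicate dd 0)

-- ===== PORT B =====
-- scatter q[n]'s contribution forward into the residual array r
def pvBScatter (b : List Int) (qn : Int) (n hi : Nat) (r : List Int) : List Int :=
  (List.range' 1 hi).foldl
    (fun r i => r.set (n + i) ((r.getD (n + i) 0 - b.getD i 0 * qn) % pvMod)) r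

def pvBStep (b : List Int) (iv : Int) (dd : Nat) (st : List Int × List Int) (n : Nat) :
    List Int × List Int :=
  let qn := st.1.getD n 0 * iv % pvMod
  let hi := min (dd - 1 - n) (b.length - 1)
  (pvBScatter b qn n hi st.1, st.2 ++ [qn])

def fps_div_naive_alt (a : List Int) (b : List Int) (deg : Int) : List Int :=
  let deg1 : Int := if deg = -1 then max (a.length : Int) (b.length : Int) else deg
  let inv_b0 := pvPow (b.getD 0 0 % pvMod) (pvMod - 2).toNat pvMod
  let dd := deg1.toNat
  let r0 := (List.range dd).map (fun n => if n < a.length then a.getD n 0 % pvMod else 0)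
  ((List.range dd).foldl (pvBStep b inv_b0 dd) (r0, [])).2

-- ===== PRECONDITION & SPEC =====
-- Pre_ excludes exactly the inputs where the Python raises ZeroDivisionError:
-- empty b or b[0] ≡ 0 (mod 998244353).
def Pre_fps_div_naive (a : List Int) (b : List Int) (deg : Int) : Prop :=
  b ≠ [] ∧ b.getD 0 0 % pvMod ≠ 0
instance (a : List Int) (b : List Int) (deg : Int) : Decidable (Pre_fps_div_naive a b deg) := by
  unfold Pre_fps_div_naive; infer_instance

def pvWitness_fps_div_naive : List Int × List Int × Int := ([1, 2, 3], [1, 1], -1)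

def Spec_fps_div_naive (a : List Int) (b : List Int) (deg : Int) (out : List Int) : Prop :=
  out = fps_div_naive_alt a b deg
instance (a : List Int) (b : List Int) (deg : Int) (out : List Int) :
    Decidable (Spec_fps_div_naive a b deg out) := by unfold Spec_fps_div_naive; infer_instance

-- ===== CLAIM (what is proved, stated in full; the proofs are below) =====
def Claim_equal_fps_div_naive : Prop := ∀ (a : List Int) (b : List Int) (deg : Int),
  Dom_fps_div_naive a b deg → Pre_fps_div_naive a b deg →
  Spec_fps_div_naive a b deg (fps_div_naive a b deg)

-- ===== LEMMAS AND PROOFS =====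

-- reference sequence: the canonical quotient coefficients
def pvAval (a : List Int) (n : Nat) : Int := if n < a.length then a.getD n 0 % pvMod else 0

def pvGSum (b : List Int) (g : Nat → Int) (n : Nat) : Int :=
  ((List.range' 1 (min n (b.length - 1))).map (fun i => b.getD i 0 * g (n - i))).sum

def pvQ (a : List Int) (b : List Int) (iv : Int) : Nat → List Int
  | 0 => []
  | n + 1 => pvQ a b iv n ++
      [((pvAval a n - pvGSum b (fun j => (pvQ a b iv n).getD j 0) n) % pvMod) * iv % pvMod]

def pvQe (a : List Int) (b : List Int) (iv : Int) (n : Nat) : Int :=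
  ((pvAval a n - pvGSum b (fun j => (pvQ a b iv n).getD j 0) n) % pvMod) * iv % pvMod

-- residual value of cell m after the first k steps of B
def pvR (a : List Int) (b : List Int) (iv : Int) (k m : Nat) : Int :=
  (pvAval a m -
    (((List.range' 1 (min m (b.length - 1))).filter (fun i => decide (m - i < k))).map
      (fun i => b.getD i 0 * pvQe a b iv (m - i))).sum) % pvMod

-- modular arithmetic helpers
theorem pv_emod_emod (x : Int) : x % pvMod % pvMod = x % pvMod :=
  Int.emod_emod_of_dvd _ dvd_rfl

theorem pvAval_emod (a : List Int) (n : Nat) : pvAval a n % pvMod = pvAval a n := by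
  unfold pvAval; split
  · exact pv_emod_emod _
  · norm_num

theorem pv_sub_emod_left (x y : Int) : (x % pvMod - y) % pvMod = (x - y) % pvMod := by
  rw [Int.sub_emod x y, Int.sub_emod (x % pvMod) y, pv_emod_emod]

theorem pv_foldl_sub_collapse (g : Nat → Int) (l : List Nat) (init : Int)
    (h : init % pvMod = init) :
    l.foldl (fun s i => (s - g i) % pvMod) init = (init - (l.map g).sum) % pvMod := by
  induction l generalizing init with
  | nil => simpa using h.symm
  | cons x xs ih =>
    simp only [List.foldl_cons, List.map_cons, List.sum_cons]
    rw [ih ((init - g x) % pvMod) (pv_emod_emod _), pv_sub_emod_left, sub_sub]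

theorem pvQ_length (a b : List Int) (iv : Int) (k : Nat) : (pvQ a b iv k).length = k := by
  induction k with
  | zero => rfl
  | succ n ih => simp [pvQ, ih]

theorem pvQ_getD (a b : List Int) (iv : Int) (j k : Nat) (h : j < k) :
    (pvQ a b iv k).getD j 0 = pvQe a b iv j := by
  induction k with
  | zero => omega
  | succ n ih =>
    rcases Nat.lt_or_ge j n with hj | hj
    · rw [pvQ, List.getD_append _ _ _ _ (by rw [pvQ_length]; exact hj), ih hj]
    · have hjn : j = n := by omega
      subst hjn
      rw [pvQ, List.getD_append_right _ _ _ _ (by rw [pvQ_length]), pvQ_length]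
      simp [pvQe]

-- ---- A side ----
theorem pvAStep_spec (a b : List Int) (iv : Int) (k t : Nat) (ht : 1 ≤ t) :
    pvAStep a b iv (pvQ a b iv k ++ List.replicate t 0) k
      = pvQ a b iv (k + 1) ++ List.replicate (t - 1) 0 := by
  obtain ⟨t', rfl⟩ : ∃ t', t = t' + 1 := ⟨t - 1, by omega⟩
  simp only [pvAStep]
  have hc : ∀ (s : Int), ∀ i ∈ List.range' 1 (min k (b.length - 1)),
      (s - b.getD i 0 * ((pvQ a b iv k ++ List.replicate (t' + 1) 0).getD (k - i) 0)) % pvMod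
      = (s - b.getD i 0 * ((pvQ a b iv k).getD (k - i) 0)) % pvMod := by
    intro s i hi
    rw [List.mem_range'_1] at hi
    rw [List.getD_append _ _ _ _ (by rw [pvQ_length]; omega)]
  rw [PySem.List.foldl_congr_mem _ _ _ _ hc,
    show (if k < a.length then a.getD k 0 % pvMod else 0) = pvAval a k from rfl,
    pv_foldl_sub_collapse (fun i => b.getD i 0 * ((pvQ a b iv k).getD (k - i) 0)) _ _
      (pvAval_emod a k)]
  rw [List.set_append, if_neg (by rw [pvQ_length]; omega), pvQ_length, Nat.sub_self,
    List.replicate_succ, List.set_cons_zero]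
  rw [show pvQ a b iv k ++
        ((pvAval a k - ((List.range' 1 (min k (b.length - 1))).map
            (fun i => b.getD i 0 * (pvQ a b iv k).getD (k - i) 0)).sum) % pvMod * iv % pvMod)
        :: List.replicate t' 0
      = (pvQ a b iv k ++
        [((pvAval a k - pvGSum b (fun j => (pvQ a b iv k).getD j 0) k) % pvMod) * iv % pvMod])
        ++ List.replicate t' 0 by rw [List.append_cons]; rfl]
  rfl

theorem A_loop (a b : List Int) (iv : Int) (dd : Nat) :
    ∀ k, k ≤ dd → (List.range k).foldl (pvAStep a b iv) (List.replicate dd 0)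
      = pvQ a b iv k ++ List.replicate (dd - k) 0 := by
  intro k
  induction k with
  | zero => intro _; simp [pvQ]
  | succ n ih =>
    intro hk
    rw [List.range_succ, List.foldl_append, ih (by omega), List.foldl_cons, List.foldl_nil,
      pvAStep_spec a b iv n (dd - n) (by omega)]
    have : dd - n - 1 = dd - (n + 1) := by omega
    rw [this]

-- ---- B side ----
theorem pv_getD_set (l : List Int) (j : Nat) (v : Int) (m : Nat) :
    (l.set j v).getD m 0 = if j = m ∧ j < l.length then v else l.getD m 0 := by
  by_cases h : j = m ∧ j < l.length
  · obtain ⟨h1, h2⟩ := h; subst h1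
    rw [if_pos ⟨rfl, h2⟩, List.getD_eq_getElem?_getD, List.getElem?_set, if_pos rfl, if_pos h2]
    rfl
  · rw [if_neg h, List.getD_eq_getElem?_getD, List.getD_eq_getElem?_getD, List.getElem?_set]
    by_cases hj : j = m
    · have hl : ¬ j < l.length := fun hc => h ⟨hj, hc⟩
      rw [if_pos hj, if_neg hl]
      subst hj
      rw [List.getElem?_eq_none (by omega)]
    · rw [if_neg hj]

theorem pvBScatter_length (b : List Int) (qn : Int) (n hi : Nat) (r : List Int) :
    (pvBScatter b qn n hi r).length = r.length := by
  unfold pvBScatter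
  generalize List.range' 1 hi = l
  induction l generalizing r with
  | nil => rfl
  | cons x xs ih => rw [List.foldl_cons, ih, List.length_set]

theorem pvBScatter_getD (b : List Int) (qn : Int) (n : Nat) :
    ∀ (hi : Nat) (r : List Int) (m : Nat), n + hi < r.length →
    (pvBScatter b qn n hi r).getD m 0 =
      if n + 1 ≤ m ∧ m ≤ n + hi then (r.getD m 0 - b.getD (m - n) 0 * qn) % pvMod
      else r.getD m 0 := by
  intro hi
  induction hi with
  | zero =>
    intro r m _
    simp only [pvBScatter, List.range'_zero, List.foldl_nil,
      if_neg (by omega : ¬ (n + 1 ≤ m ∧ m ≤ n + 0))]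
  | succ t ih =>
    intro r m hlen
    have hstep : List.range' 1 (t + 1) = List.range' 1 t ++ [1 + t] := by
      simpa using (List.range'_concat (s := 1) (n := t) (step := 1))
    have hfold : pvBScatter b qn n (t + 1) r
        = (pvBScatter b qn n t r).set (n + (1 + t))
            (((pvBScatter b qn n t r).getD (n + (1 + t)) 0 - b.getD (1 + t) 0 * qn) % pvMod) := by
      rw [pvBScatter, hstep, List.foldl_append, List.foldl_cons, List.foldl_nil]
      rfl
    have hlen' : (pvBScatter b qn n t r).length = r.length := pvBScatter_length _ _ _ _ _
    have hout : (pvBScatter b qn n t r).getD (n + (1 + t)) 0 = r.getD (n + (1 + t)) 0 := by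
      rw [ih r (n + (1 + t)) (by omega)]
      exact if_neg (by omega)
    rw [hfold, pv_getD_set, hout]
    by_cases hm : n + (1 + t) = m
    · subst hm
      rw [if_pos ⟨rfl, by omega⟩, if_pos (by omega)]
      have : n + (1 + t) - n = 1 + t := by omega
      rw [this]
    · rw [if_neg (fun hc => hm hc.1), ih r m (by omega)]
      by_cases h2 : n + 1 ≤ m ∧ m ≤ n + t
      · rw [if_pos h2, if_pos (by omega)]
      · rw [if_neg h2, if_neg (by omega)]

theorem pv_getD_map_range (g : Nat → Int) (dd k : Nat) (hk : k < dd) :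
    ((List.range dd).map g).getD k 0 = g k := by
  rw [List.getD_eq_getElem _ _ (by simpa using hk)]
  simp

-- at step k the residual r[k] carries the full gather sum
theorem pvR_self (a b : List Int) (iv : Int) (k : Nat) :
    pvR a b iv k k = (pvAval a k - pvGSum b (fun j => (pvQ a b iv k).getD j 0) k) % pvMod := by
  unfold pvR pvGSum
  have hfil : (List.range' 1 (min k (b.length - 1))).filter (fun i => decide (k - i < k))
      = List.range' 1 (min k (b.length - 1)) := by
    apply List.filter_eq_self.mpr
    intro i hi
    rw [List.mem_range'_1] at hi
    simp only [decide_eq_true_eq]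
    omega
  rw [hfil]
  have hmap : (List.range' 1 (min k (b.length - 1))).map
        (fun i => b.getD i 0 * pvQe a b iv (k - i))
      = (List.range' 1 (min k (b.length - 1))).map
        (fun i => b.getD i 0 * (pvQ a b iv k).getD (k - i) 0) := by
    refine List.map_congr_left fun i hi => ?_
    rw [List.mem_range'_1] at hi
    rw [pvQ_getD a b iv (k - i) k (by omega)]
  rw [hmap]

-- filter split at the newly-admitted index
theorem pv_filter_split (u i0 : Nat) (h1 : 1 ≤ i0) (h2 : i0 ≤ u) (p q : Nat → Bool)
    (hp : ∀ i, 1 ≤ i → i ≤ u → p i = decide (i0 ≤ i))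
    (hq : ∀ i, 1 ≤ i → i ≤ u → q i = decide (i0 + 1 ≤ i)) :
    (List.range' 1 u).filter p = i0 :: (List.range' 1 u).filter q := by
  have hr := List.range'_append (s := 1) (m := i0 - 1) (n := u - i0 + 1) (step := 1)
  rw [show 1 + 1 * (i0 - 1) = i0 by omega, show i0 - 1 + (u - i0 + 1) = u by omega] at hr
  rw [← hr, List.filter_append, List.filter_append]
  have hsec : List.range' i0 (u - i0 + 1) = i0 :: List.range' (i0 + 1) (u - i0) := by
    simpa using (List.range'_succ (s := i0) (n := u - i0) (step := 1))
  have hfp : (List.range' 1 (i0 - 1)).filter p = [] := by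
    apply List.filter_eq_nil_iff.mpr
    intro i hi
    rw [List.mem_range'_1] at hi
    rw [hp i hi.1 (by omega)]
    simp
    omega
  have hfq : (List.range' 1 (i0 - 1)).filter q = [] := by
    apply List.filter_eq_nil_iff.mpr
    intro i hi
    rw [List.mem_range'_1] at hi
    rw [hq i hi.1 (by omega)]
    simp
    omega
  have hsp : (List.range' i0 (u - i0 + 1)).filter p = i0 :: List.range' (i0 + 1) (u - i0) := by
    rw [hsec, List.filter_cons, if_pos (by rw [hp i0 (by omega) h2]; simp)]
    congr 1
    apply List.filter_eq_self.mpr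
    intro i hi
    rw [List.mem_range'_1] at hi
    rw [hp i (by omega) (by omega)]
    simp
    omega
  have hsq : (List.range' i0 (u - i0 + 1)).filter q = List.range' (i0 + 1) (u - i0) := by
    rw [hsec, List.filter_cons, if_neg (by rw [hq i0 (by omega) h2]; simp)]
    apply List.filter_eq_self.mpr
    intro i hi
    rw [List.mem_range'_1] at hi
    rw [hq i (by omega) (by omega)]
    simp
    omega
  rw [hfp, hfq, hsp, hsq]
  rfl

theorem pvR_untouch (a b : List Int) (iv : Int) (k m : Nat)
    (h : ∀ i, 1 ≤ i → i ≤ min m (b.length - 1) → ((m - i < k + 1) ↔ (m - i < k))) :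
    pvR a b iv (k + 1) m = pvR a b iv k m := by
  unfold pvR
  have hfil : (List.range' 1 (min m (b.length - 1))).filter (fun i => decide (m - i < k + 1))
      = (List.range' 1 (min m (b.length - 1))).filter (fun i => decide (m - i < k)) := by
    apply List.filter_congr
    intro i hi
    rw [List.mem_range'_1] at hi
    simp only [decide_eq_decide]
    exact h i hi.1 (by omega)
  rw [hfil]

theorem pvR_touch (a b : List Int) (iv : Int) (k m : Nat) (h1 : k < m)
    (h2 : m - k ≤ b.length - 1) :
    (pvR a b iv k m - b.getD (m - k) 0 * pvQe a b iv k) % pvMod = pvR a b iv (k + 1) m := by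
  unfold pvR
  rw [pv_sub_emod_left]
  rw [pv_filter_split (min m (b.length - 1)) (m - k) (by omega) (by omega)
    (fun i => decide (m - i < k + 1)) (fun i => decide (m - i < k))
    (by intro i hi1 hi2; simp only [decide_eq_decide]; omega)
    (by intro i hi1 hi2; simp only [decide_eq_decide]; omega)]
  rw [List.map_cons, List.sum_cons, show m - (m - k) = k by omega]
  ring_nf

theorem pvBStep_spec (a b : List Int) (iv : Int) (dd k : Nat) (hk : k < dd) :
    pvBStep b iv dd ((List.range dd).map (pvR a b iv k), pvQ a b iv k) k
      = ((List.range dd).map (pvR a b iv (k + 1)), pvQ a b iv (k + 1)) := by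
  have hqn : ((List.range dd).map (pvR a b iv k)).getD k 0 * iv % pvMod = pvQe a b iv k := by
    rw [pv_getD_map_range _ dd k hk, pvR_self]
    rfl
  simp only [pvBStep]
  rw [hqn]
  refine Prod.ext ?_ (by simp [pvQ, pvQe])
  show pvBScatter b (pvQe a b iv k) k (min (dd - 1 - k) (b.length - 1))
      ((List.range dd).map (pvR a b iv k)) = (List.range dd).map (pvR a b iv (k + 1))
  set hi := min (dd - 1 - k) (b.length - 1) with hhi
  apply List.ext_getElem
  · rw [pvBScatter_length]; simp
  · intro m hm1 hm2
    have hm : m < dd := by simpa using hm2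
    have hlen : ((List.range dd).map (pvR a b iv k)).length = dd := by simp
    rw [← List.getD_eq_getElem _ 0 hm1, ← List.getD_eq_getElem _ 0 hm2,
      pvBScatter_getD b _ k hi _ m (by rw [hlen]; omega),
      pv_getD_map_range _ dd m hm]
    by_cases hc : k + 1 ≤ m ∧ m ≤ k + hi
    · rw [if_pos hc, pv_getD_map_range _ dd m hm]
      exact pvR_touch a b iv k m (by omega) (by omega)
    · rw [if_neg hc, pv_getD_map_range _ dd m hm]
      exact (pvR_untouch a b iv k m (by intro i hi1 hi2; omega)).symm

theorem B_loop (a b : List Int) (iv : Int) (dd : Nat) :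
    ∀ k, k ≤ dd → (List.range k).foldl (pvBStep b iv dd)
        ((List.range dd).map (fun n => if n < a.length then a.getD n 0 % pvMod else 0), [])
      = ((List.range dd).map (pvR a b iv k), pvQ a b iv k) := by
  intro k
  induction k with
  | zero =>
    intro _
    refine Prod.ext ?_ (by simp [pvQ])
    simp only [List.range_zero, List.foldl_nil]
    refine List.map_congr_left fun m hm => ?_
    have hfil : (List.range' 1 (min m (b.length - 1))).filter (fun i => decide (m - i < 0))
        = [] := List.filter_eq_nil_iff.mpr (by intro i _; simp)
    show pvAval a m = pvR a b iv 0 m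
    rw [pvR, hfil]
    simpa using (pvAval_emod a m).symm
  | succ n ih =>
    intro hk
    rw [List.range_succ, List.foldl_append, ih (by omega), List.foldl_cons, List.foldl_nil,
      pvBStep_spec a b iv dd n (by omega)]

theorem fps_div_naive_eq (a b : List Int) (deg : Int) :
    fps_div_naive a b deg = fps_div_naive_alt a b deg := by
  simp only [fps_div_naive, fps_div_naive_alt]
  rw [A_loop a b _ _ _ le_rfl, B_loop a b _ _ _ le_rfl]
  simp

-- ===== VERDICT (by name: the statement is the Claim_ definition above) =====
theorem fps_div_naive_spec : Claim_equal_fps_div_naive := by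
  intro a b deg _ _
  unfold Spec_fps_div_naive
  exact fps_div_naive_eq a b deg
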